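-- pv_equiv track=rewrite | github.com/ahammel/srtools | srtools.py | make_dot_queue
-- ===== SOURCE A (Python) =====
-- def convert_indecies(cigar):
--     """Converts a cigar from (n, operator) format to (index, n, operator).
--     The index is the zero-based position of the operator, and n is its length.
--
--     """
--     index = 0
--     c_cigar = []  # c for converted
--     for i, o in cigar:
--         c_cigar.append((index, i, o))
--         index += i
--     return c_cigar
--
-- def make_dot_queue(stripped_read, stripped_read_list):
--     """Returns a queue of positions at which the stripped_read should be dotted
--     to indicate an indel. A stripped_read is a 3-tuple of the sequence, the
--     cigar and the position. Helper function for dot_indels.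
--
--     """
--     queue = []
--     s_seq, s_cigar, s_pos = stripped_read
--     for read in stripped_read_list:
--         seq, cigar, pos = read
--         c_cigar = convert_indecies(cigar)
--         offset = pos - s_pos
--         if seq == s_seq and pos == s_pos:
--             queue.extend([(i, n) for i, n, o in c_cigar if o in "ND"])
--         else:
--             queue.extend([(i + offset, n) for i, n, o in c_cigar if o == "I"])
--     return queue
-- ===== SOURCE B (Python) =====
-- def make_dot_queue(stripped_read, stripped_read_list):
--     """One flat comprehension; each dot's index is the closed-form prefix sum
--     of cigar lengths before it, instead of a running accumulator or a helper
--     table."""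
--     s_seq, _s_cigar, s_pos = stripped_read
--     return [
--         (sum(m for m, _ in cigar[:k])
--          + (0 if seq == s_seq and pos == s_pos else pos - s_pos), n)
--         for seq, cigar, pos in stripped_read_list
--         for k, (n, op) in enumerate(cigar)
--         if (op in "ND" if seq == s_seq and pos == s_pos else op == "I")
--     ]
-- ===== Notes on version B (the rewrite author's own statement) =====
-- stated objective: alternative
-- what changed: B replaces A's mutable queue plus the convert_indecies running-index table with a single flat comprehension in which each dot's index is computed in closed form as the prefix sum of the cigar lengths before it (sum over cigar[:k] via enumerate), trading the accumulator for per-element prefix sums.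
import Mathlib
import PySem

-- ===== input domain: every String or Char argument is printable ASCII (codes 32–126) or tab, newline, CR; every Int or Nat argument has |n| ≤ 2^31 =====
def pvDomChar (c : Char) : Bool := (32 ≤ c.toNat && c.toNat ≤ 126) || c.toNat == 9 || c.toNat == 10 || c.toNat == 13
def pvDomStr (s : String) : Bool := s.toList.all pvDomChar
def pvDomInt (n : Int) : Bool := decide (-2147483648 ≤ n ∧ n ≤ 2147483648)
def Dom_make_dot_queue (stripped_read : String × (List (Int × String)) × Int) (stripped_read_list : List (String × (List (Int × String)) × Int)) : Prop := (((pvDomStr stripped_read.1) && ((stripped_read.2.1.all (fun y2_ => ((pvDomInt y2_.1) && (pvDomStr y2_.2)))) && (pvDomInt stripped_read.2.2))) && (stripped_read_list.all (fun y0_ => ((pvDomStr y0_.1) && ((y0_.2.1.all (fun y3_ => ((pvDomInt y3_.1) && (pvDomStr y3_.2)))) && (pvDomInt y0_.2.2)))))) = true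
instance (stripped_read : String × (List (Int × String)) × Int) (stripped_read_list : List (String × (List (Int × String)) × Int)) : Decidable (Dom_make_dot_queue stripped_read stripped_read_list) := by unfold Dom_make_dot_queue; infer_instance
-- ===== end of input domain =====

-- B replaces A's accumulator/table construction by one flat comprehension whose indices are closed-form prefix sums (objective: alternative).

-- ===== PORT A =====
-- convert_indecies: builds the (index, n, op) table via a fold carrying (index, c_cigar)
def convert_indecies (cigar : List (Int × String)) : List (Int × Int × String) :=
  (cigar.foldl (fun (st : Int × List (Int × Int × String)) io =>
    (st.1 + io.1, st.2 ++ [(st.1, io.1, io.2)])) (0, [])).2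

def make_dot_queue (stripped_read : String × (List (Int × String)) × Int) (stripped_read_list : List (String × (List (Int × String)) × Int)) : List (Int × Int) :=
  let s_seq := stripped_read.1
  let s_pos := stripped_read.2.2
  stripped_read_list.foldl (fun queue read =>
    let seq := read.1
    let cigar := read.2.1
    let pos := read.2.2
    let c_cigar := convert_indecies cigar
    let offset := pos - s_pos
    if seq == s_seq && pos == s_pos then
      queue ++ ((c_cigar.filter (fun t => PySem.Str.isIn t.2.2 "ND")).map (fun t => (t.1, t.2.1)))
    else
      queue ++ ((c_cigar.filter (fun t => t.2.2 == "I")).map (fun t => (t.1 + offset, t.2.1)))) []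

-- ===== PORT B =====
-- one flat comprehension: flatMap over the reads, filter+map over enumerate(cigar);
-- each index is the prefix sum of cigar[:k] (sum over a slice, exact for k ≥ 0 as produced by enumerate)
def make_dot_queue_alt (stripped_read : String × (List (Int × String)) × Int) (stripped_read_list : List (String × (List (Int × String)) × Int)) : List (Int × Int) :=
  let s_seq := stripped_read.1
  let s_pos := stripped_read.2.2
  stripped_read_list.flatMap (fun read =>
    let seq := read.1
    let cigar := read.2.1
    let pos := read.2.2
    ((PySem.List.enumerate cigar 0).filter (fun kp =>
        if seq == s_seq && pos == s_pos then PySem.Str.isIn kp.2.2 "ND" else kp.2.2 == "I")).map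
      (fun kp =>
        ((PySem.List.slice cigar none (some kp.1)).foldl (fun a p => a + p.1) 0
          + (if seq == s_seq && pos == s_pos then 0 else pos - s_pos), kp.2.1)))

-- ===== PRECONDITION & SPEC =====
def Spec_make_dot_queue (stripped_read : String × (List (Int × String)) × Int) (stripped_read_list : List (String × (List (Int × String)) × Int)) (out : List (Int × Int)) : Prop := out = make_dot_queue_alt stripped_read stripped_read_list
instance (stripped_read : String × (List (Int × String)) × Int) (stripped_read_list : List (String × (List (Int × String)) × Int)) (out : List (Int × Int)) : Decidable (Spec_make_dot_queue stripped_read stripped_read_list out) := by unfold Spec_make_dot_queue; infer_instance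

-- ===== CLAIM =====
def Claim_equal_make_dot_queue : Prop := ∀ (stripped_read : String × (List (Int × String)) × Int) (stripped_read_list : List (String × (List (Int × String)) × Int)), Dom_make_dot_queue stripped_read stripped_read_list → Spec_make_dot_queue stripped_read stripped_read_list (make_dot_queue stripped_read stripped_read_list)

-- ===== LEMMAS AND PROOFS =====

-- the (index, n, op) table written structurally, with an arbitrary starting index
def convFrom (cigar : List (Int × String)) (index : Int) : List (Int × Int × String) :=
  match cigar with
  | [] => []
  | (n, op) :: rest => (index, n, op) :: convFrom rest (index + n)

theorem conv_foldl_eq (cigar : List (Int × String)) :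
    ∀ (index : Int) (acc : List (Int × Int × String)),
      (cigar.foldl (fun (st : Int × List (Int × Int × String)) io =>
        (st.1 + io.1, st.2 ++ [(st.1, io.1, io.2)])) (index, acc)).2 = acc ++ convFrom cigar index := by
  induction cigar with
  | nil => intro index acc; simp [convFrom]
  | cons hd tl ih =>
      intro index acc
      obtain ⟨n, op⟩ := hd
      simp [List.foldl, convFrom, ih]

theorem convert_indecies_eq (cigar : List (Int × String)) :
    convert_indecies cigar = convFrom cigar 0 := by
  simpa using conv_foldl_eq cigar 0 []

-- shifting the start value out of a sum-fold
theorem foldl_add_shift (t : List (Int × String)) :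
    ∀ c : Int, t.foldl (fun a p => a + p.1) c = c + t.foldl (fun a p => a + p.1) 0 := by
  induction t with
  | nil => intro c; simp
  | cons hd tl ih =>
      intro c
      simp only [List.foldl_cons]
      rw [ih (c + hd.1), ih (0 + hd.1)]
      ring

-- A's table equals the enumerate view with closed-form prefix-sum indices
theorem conv_enum (cigar : List (Int × String)) :
    ∀ (i s : Int), 0 ≤ s →
      convFrom cigar i = (PySem.List.enumerate cigar s).map
        (fun kp => (i + (PySem.List.slice cigar none (some (kp.1 - s))).foldl (fun a p => a + p.1) 0, kp.2)) := by
  induction cigar with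
  | nil => intro i s _; simp [convFrom, PySem.List.enumerate_nil]
  | cons hd tl ih =>
      intro i s hs
      obtain ⟨n, op⟩ := hd
      rw [PySem.List.enumerate_cons]
      simp only [List.map_cons, convFrom]
      congr 1
      · have hss : s - s = (0 : Int) := by ring
        rw [hss, PySem.List.slice_to _ (b := 0) (by omega)]
        simp
      · rw [ih (i + n) (s + 1) (by omega)]
        apply List.map_congr_left
        intro kp hmem
        rw [PySem.List.mem_enumerate_iff] at hmem
        obtain ⟨k, hk, rfl⟩ := hmem
        have h1 : (s + 1 + (k : Int)) - s = ((k : Int) + 1) := by omega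
        have h2 : (s + 1 + (k : Int)) - (s + 1) = (k : Int) := by omega
        rw [h1, h2, PySem.List.slice_to _ (b := (k : Int) + 1) (by omega),
            PySem.List.slice_to _ (b := (k : Int)) (by omega)]
        have h3 : ((k : Int) + 1).toNat = k + 1 := by omega
        have h4 : ((k : Int)).toNat = k := by omega
        rw [h3, h4, List.take_succ_cons, List.foldl_cons, foldl_add_shift]
        simp only [Prod.mk.injEq]
        rw [foldl_add_shift (List.take k tl) (0 + n)]
        exact ⟨by ring, trivial⟩

-- per-read: A's filtered/mapped table equals B's filtered/mapped enumerate
theorem per_read (matching : Bool) (offset : Int) (cigar : List (Int × String)) :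
    (if matching then
       ((convFrom cigar 0).filter (fun t => PySem.Str.isIn t.2.2 "ND")).map (fun t => (t.1, t.2.1))
     else
       ((convFrom cigar 0).filter (fun t => t.2.2 == "I")).map (fun t => (t.1 + offset, t.2.1)))
    = ((PySem.List.enumerate cigar 0).filter (fun kp =>
          if matching then PySem.Str.isIn kp.2.2 "ND" else kp.2.2 == "I")).map
        (fun kp =>
          ((PySem.List.slice cigar none (some kp.1)).foldl (fun a p => a + p.1) 0
            + (if matching then 0 else offset), kp.2.1)) := by
  rw [conv_enum cigar 0 0 le_rfl]
  cases matching <;>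
    simp [List.filter_map, List.map_map, Function.comp_def]

-- ===== VERDICT =====
theorem make_dot_queue_spec : Claim_equal_make_dot_queue := by
  intro stripped_read stripped_read_list hdom
  clear hdom
  unfold Spec_make_dot_queue make_dot_queue make_dot_queue_alt
  induction stripped_read_list using List.reverseRecOn with
  | nil => rfl
  | append_singleton tl read ih =>
      simp only [List.foldl_append, List.foldl_cons, List.foldl_nil, List.flatMap_append,
        List.flatMap_cons, List.flatMap_nil, List.append_nil] at *
      rw [ih, convert_indecies_eq]
      by_cases h : (read.1 == stripped_read.1 && read.2.2 == stripped_read.2.2) = true <;>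
        simp only [h, if_true, if_false, Bool.false_eq_true] <;>
        refine congrArg (_ ++ ·) ?_
      · have hpr := per_read true (read.2.2 - stripped_read.2.2) read.2.1
        simp only [if_true] at hpr
        simpa using hpr
      · have hpr := per_read false (read.2.2 - stripped_read.2.2) read.2.1
        simp only [Bool.false_eq_true, if_false] at hpr
        simpa using hpr
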